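-- pv_equiv track=rewrite | github.com/axu4github/scripts | corpus/corpus.py | format_voice_content
-- ===== SOURCE A (Python) =====
-- def filter_result(format_result):
--     _min, _max, line_number = 10, 100, len(format_result)
--     return line_number < _min or line_number > _max
--
-- def format_voice_content(voice_content):
--     """ 格式化一个语音文件的语料 """
--     format_result = []
--     if len(voice_content) > 0:
--         voice_content, temp = list(enumerate(voice_content)), []
--         for (i, line) in voice_content:
--             if i == 0:
--                 format_result.append(line[0])
--             else:
--                 start, end, plaintext, curr_role = line
--                 if i == 1:
--                     temp = line
--                 else:
--                     pre_voice_content = voice_content[i - 1][1]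
--                     pre_role = pre_voice_content[3]
--                     if curr_role == pre_role:
--                         temp[1] = end
--                         temp[2] = "{0} {1}".format(temp[2], plaintext)
--                     else:
--                         temp[1] = pre_voice_content[1]
--                         format_result.append("\t".join(temp))
--                         temp = line
--
--         if len(temp) > 0:
--             format_result.append("\t".join(temp))
--
--     return (format_result, filter_result(format_result))
-- ===== SOURCE B (Python) =====
-- def filter_result(format_result):
--     _min, _max, line_number = 10, 100, len(format_result)
--     return line_number < _min or line_number > _max
--
-- def format_voice_content(voice_content):
--     """ 格式化一个语音文件的语料 (recursive group-splitting; return value only, no in-place mutation) """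
--     def fmt_groups(lines):
--         # split off the maximal leading run of lines with the same role, format it
--         # from its first/last line, recurse on the remainder
--         if not lines:
--             return []
--         role = lines[0][3]
--         k = 1
--         while k < len(lines) and lines[k][3] == role:
--             k += 1
--         g = lines[:k]
--         merged = "\t".join([g[0][0], g[-1][1], " ".join(l[2] for l in g), role])
--         return [merged] + fmt_groups(lines[k:])
--
--     if not voice_content:
--         return ([], filter_result([]))
--     result = [voice_content[0][0]] + fmt_groups(voice_content[1:])
--     return (result, filter_result(result))
-- ===== Notes on version B (the rewrite author's own statement) =====
-- stated objective: alternative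
-- what changed: A walks list(enumerate(voice_content)) maintaining a running mutable merged line 'temp' (re-reading the previous line via voice_content[i-1] and flushing after the loop); B never maintains a running merge: it recursively splits voice_content[1:] into maximal same-role runs (a while-scan finds each run's length) and formats every run in one shot from its first line, last line and joined texts.
import Mathlib
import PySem

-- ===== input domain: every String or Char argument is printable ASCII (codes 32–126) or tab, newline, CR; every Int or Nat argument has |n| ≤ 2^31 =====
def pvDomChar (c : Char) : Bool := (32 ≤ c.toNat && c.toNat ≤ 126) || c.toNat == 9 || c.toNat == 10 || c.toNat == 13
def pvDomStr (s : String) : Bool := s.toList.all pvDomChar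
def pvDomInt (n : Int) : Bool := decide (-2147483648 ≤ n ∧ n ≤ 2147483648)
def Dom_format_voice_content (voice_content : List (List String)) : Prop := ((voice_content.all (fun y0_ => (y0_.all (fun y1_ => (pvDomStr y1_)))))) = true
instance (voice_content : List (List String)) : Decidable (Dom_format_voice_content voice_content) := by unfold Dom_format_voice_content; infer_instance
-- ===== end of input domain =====

-- B replaces A's enumerate loop (index arithmetic, deferred mutable merged line `temp`,
-- trailing flush) by recursive splitting into maximal same-role runs, each run formatted
-- in one shot from its first/last line; same return value. A mutates the caller's line
-- lists in place, B does not: the equivalence proved here is about the return value.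

-- ===== PORT A =====
def pvJoinTab (l : List String) : String := PySem.Str.join "\t" l

def filter_result (format_result : List String) : Bool :=
  decide (format_result.length < 10) || decide (format_result.length > 100)

-- loop body of A's `for (i, line) in voice_content:`; state = (format_result, temp).
-- A mutates `temp` (aliasing an input line) in place, but every read it performs through
-- `voice_content[i - 1]` sees only unmutated fields, so the pure state below is exact for
-- the return value.  The indices `line[0]`, `pre_voice_content[1]`, `pre_voice_content[3]`
-- are in range under Pre_, hence `headD`/`getD` are exact there; a line that does not
-- unpack into 4 items raises ValueError in Python (excluded by Pre_).
def pvStepA (vc : List (List String)) (st : List String × List String)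
    (p : Int × List String) : List String × List String :=
  let format_result := st.1
  let temp := st.2
  let i := p.1
  let line := p.2
  if i = 0 then
    (format_result ++ [line.headD ""], temp)
  else
    match line with
    | [_start, stop, plaintext, curr_role] =>
      if i = 1 then (format_result, line)
      else
        let pre_voice_content := (PySem.List.pyGet? vc (i - 1)).getD []
        let pre_role := pre_voice_content.getD 3 ""
        if curr_role = pre_role then
          (format_result, (temp.set 1 stop).set 2 ((temp.getD 2 "") ++ " " ++ plaintext))
        else
          let temp2 := temp.set 1 (pre_voice_content.getD 1 "")
          (format_result ++ [pvJoinTab temp2], line)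
    | _ => (format_result, temp)

def format_voice_content (voice_content : List (List String)) : List String × Bool :=
  let format_result : List String := []
  if voice_content.length > 0 then
    let st := (PySem.List.enumerate voice_content).foldl (pvStepA voice_content)
      (format_result, ([] : List String))
    let format_result := if st.2.length > 0 then st.1 ++ [pvJoinTab st.2] else st.1
    (format_result, filter_result format_result)
  else
    (format_result, filter_result format_result)

-- ===== PORT B =====
def filter_result_alt (format_result : List String) : Bool :=
  decide (format_result.length < 10) || decide (format_result.length > 100)

-- B's `while k < len(lines) and lines[k][3] == role: k += 1`, counting from index 1:
-- number of further consecutive lines with role `role` (k = 1 + this count).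
-- `lines[k][3]` is in range under Pre_, hence `getD` is exact there.
def pvCountRole (role : String) : List (List String) → Nat
  | [] => 0
  | l :: ls => if l.getD 3 "" = role then 1 + pvCountRole role ls else 0

-- B's recursive `fmt_groups`: split off the maximal leading same-role run, format it
-- from its first/last line, recurse on the remainder; `lines[:k]`/`lines[k:]` with
-- 0 ≤ k are take/drop (exact).
def pvFmtGroups (lines : List (List String)) : List String :=
  match lines with
  | [] => []
  | l0 :: rest =>
    let role := l0.getD 3 ""
    let k := 1 + pvCountRole role rest
    let g := (l0 :: rest).take k
    let merged := pvJoinTab [(g.headD []).getD 0 "", ((g.getLast?.getD []).getD 1 ""),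
        PySem.Str.join " " (g.map (fun l => l.getD 2 "")), role]
    merged :: pvFmtGroups ((l0 :: rest).drop k)
termination_by lines.length
decreasing_by simp

def format_voice_content_alt (voice_content : List (List String)) : List String × Bool :=
  match voice_content with
  | [] => ([], filter_result_alt [])
  | first :: rest =>
    let result := first.headD "" :: pvFmtGroups rest
    (result, filter_result_alt result)

-- ===== PRECONDITION & SPEC =====
-- Pre_ excludes exactly the inputs where A raises: an empty first line (IndexError on
-- line[0]) and a tail line that is not a 4-item list (ValueError on unpacking).
def Pre_format_voice_content (voice_content : List (List String)) : Prop :=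
  voice_content = [] ∨
    (voice_content.headD [] ≠ [] ∧ ∀ l ∈ voice_content.tail, l.length = 4)
instance (voice_content : List (List String)) : Decidable (Pre_format_voice_content voice_content) := by
  unfold Pre_format_voice_content; infer_instance

def pvWitness_format_voice_content : List (List String) :=
  [["x"], ["1", "2", "p", "A"], ["3", "4", "q", "A"], ["5", "6", "r", "B"]]

def Spec_format_voice_content (voice_content : List (List String)) (out : List String × Bool) : Prop := out = format_voice_content_alt voice_content
instance (voice_content : List (List String)) (out : List String × Bool) : Decidable (Spec_format_voice_content voice_content out) := by unfold Spec_format_voice_content; infer_instance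

-- ===== CLAIM (what is proved, stated in full; the proofs are below) =====
def Claim_equal_format_voice_content : Prop := ∀ (voice_content : List (List String)), Dom_format_voice_content voice_content → Pre_format_voice_content voice_content → Spec_format_voice_content voice_content (format_voice_content voice_content)

-- ===== LEMMAS AND PROOFS =====

-- Proof-side abstraction of A's merging: a grouping fold (merge each line into the last
-- open group or open a new one).  Used only to relate A's fold to B's run-splitting.
def pvStepB (groups : List (List String)) (line : List String) : List (List String) :=
  match line with
  | [start, stop, plaintext, role] =>
    match groups.getLast? with
    | some g =>
      if g.getD 3 "" = role then
        groups.dropLast ++ [[g.getD 0 "", stop, (g.getD 2 "") ++ " " ++ plaintext, g.getD 3 ""]]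
      else
        groups ++ [[start, stop, plaintext, role]]
    | none => groups ++ [[start, stop, plaintext, role]]
  | _ => groups

-- the grouping fold only ever touches the last group: a prefix passes through unchanged.
lemma pvStepB_prefix (rest : List (List String)) :
    ∀ (as : List (List String)) (g : List String),
      List.foldl pvStepB (as ++ [g]) rest = as ++ List.foldl pvStepB [g] rest := by
  induction rest with
  | nil => intro as g; rfl
  | cons l rs ih =>
    intro as g
    simp only [List.foldl_cons]
    match l with
    | [] => exact ih as g
    | [a] => exact ih as g
    | [a, b] => exact ih as g
    | [a, b, c] => exact ih as g
    | a :: b :: c :: d :: e :: t => exact ih as g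
    | [a, b, c, d] =>
      by_cases h : g[3]?.getD "" = d
      · have h1 : pvStepB (as ++ [g]) [a, b, c, d] =
            as ++ [[g.getD 0 "", b, g.getD 2 "" ++ " " ++ c, g.getD 3 ""]] := by
          simp [pvStepB, List.getD, h]
        have h2 : pvStepB [g] [a, b, c, d] =
            [[g.getD 0 "", b, g.getD 2 "" ++ " " ++ c, g.getD 3 ""]] := by
          simp [pvStepB, List.getD, h]
        rw [h1, h2]
        exact ih as _
      · have h1 : pvStepB (as ++ [g]) [a, b, c, d] = (as ++ [g]) ++ [[a, b, c, d]] := by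
          simp [pvStepB, List.getD, h]
        have h2 : pvStepB [g] [a, b, c, d] = [g] ++ [[a, b, c, d]] := by
          simp [pvStepB, List.getD, h]
        rw [h1, h2, ih (as ++ [g]) [a, b, c, d], ih [g] [a, b, c, d]]
        simp

-- main loop invariant: from index k ≥ 2 on, A's fold over `enumerate` matches the
-- grouping fold, given that the open group `g` agrees with the previous line on the
-- end (index 1) and role (index 3) fields.
lemma pv_loop (vc : List (List String)) :
    ∀ (t2 : List (List String)) (k : Nat) (prev g fr : List String),
      vc.drop (k - 1) = prev :: t2 → 2 ≤ k → prev.length = 4 →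
      (∀ l ∈ t2, l.length = 4) → g.length = 4 →
      g.getD 1 "" = prev.getD 1 "" → g.getD 3 "" = prev.getD 3 "" →
      (List.foldl (pvStepA vc) (fr, g) (PySem.List.enumerate t2 (k : Int))).1 ++
          [pvJoinTab (List.foldl (pvStepA vc) (fr, g) (PySem.List.enumerate t2 (k : Int))).2] =
        fr ++ (List.foldl pvStepB [g] t2).map pvJoinTab ∧
      (List.foldl (pvStepA vc) (fr, g) (PySem.List.enumerate t2 (k : Int))).2.length = 4 := by
  intro t2
  induction t2 with
  | nil =>
    intro k prev g fr _ _ _ _ hg4 _ _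
    simp [PySem.List.enumerate, hg4]
  | cons l rs ih =>
    intro k prev g fr hdrop hk hprev4 hall hg4 hg1 hg3
    obtain ⟨a, b, c, d, rfl⟩ : ∃ a b c d, l = [a, b, c, d] := by
      have h4 := hall l (by simp)
      match l, h4 with
      | [a, b, c, d], _ => exact ⟨a, b, c, d, rfl⟩
    obtain ⟨g0, g1, g2, g3, rfl⟩ : ∃ x y z w, g = [x, y, z, w] := by
      match g, hg4 with
      | [x, y, z, w], _ => exact ⟨x, y, z, w, rfl⟩
    have hg1' : g1 = prev.getD 1 "" := hg1
    have hg3' : g3 = prev.getD 3 "" := hg3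
    have hrest : ∀ l' ∈ rs, l'.length = 4 := fun l' hl' => hall l' (by simp [hl'])
    have hdrop' : vc.drop k = [a, b, c, d] :: rs := by
      have h := congrArg List.tail hdrop
      rw [List.tail_drop] at h
      have hk1 : k - 1 + 1 = k := by omega
      rw [hk1] at h
      simpa using h
    have hpg : PySem.List.pyGet? vc ((k : Int) - 1) = some prev := by
      have hcast : ((k : Int) - 1) = ((k - 1 : Nat) : Int) := by omega
      rw [hcast, PySem.List.pyGet?_natCast]
      have h0 : (vc.drop (k - 1))[0]? = some prev := by rw [hdrop]; rfl
      rw [List.getElem?_drop] at h0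
      simpa using h0
    have hcast1 : (k : Int) + 1 = ((k + 1 : Nat) : Int) := by omega
    rw [PySem.List.enumerate_cons, List.foldl_cons, List.foldl_cons, hcast1]
    by_cases hrole : d = prev.getD 3 ""
    · have hk0n : ¬ (k = 0) := by omega
      have hk1n : ¬ (k = 1) := by omega
      have hstep : pvStepA vc (fr, [g0, g1, g2, g3]) ((k : Int), [a, b, c, d]) =
          (fr, [g0, b, g2 ++ " " ++ c, g3]) := by
        simp [pvStepA, hk0n, hk1n, hpg, hrole]
      have hB : pvStepB [[g0, g1, g2, g3]] [a, b, c, d] = [[g0, b, g2 ++ " " ++ c, g3]] := by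
        simp [pvStepB, show g3 = d from hg3'.trans hrole.symm]
      rw [hstep, hB]
      exact ih (k + 1) [a, b, c, d] [g0, b, g2 ++ " " ++ c, g3] fr
        (by rw [show k + 1 - 1 = k from by omega]; exact hdrop') (by omega) rfl hrest rfl rfl
        (by simpa [List.getD] using (hg3'.trans hrole.symm))
    · have hk0n : ¬ (k = 0) := by omega
      have hk1n : ¬ (k = 1) := by omega
      have hrole' : ¬ (d = prev[3]?.getD "") := by simpa [List.getD] using hrole
      have hg1'' : prev[1]?.getD "" = g1 := by simpa [List.getD] using hg1'.symm
      have hstep : pvStepA vc (fr, [g0, g1, g2, g3]) ((k : Int), [a, b, c, d]) =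
          (fr ++ [pvJoinTab [g0, g1, g2, g3]], [a, b, c, d]) := by
        simp [pvStepA, hk0n, hk1n, hpg, hrole', hg1'']
      have hB : pvStepB [[g0, g1, g2, g3]] [a, b, c, d] =
          [[g0, g1, g2, g3]] ++ [[a, b, c, d]] := by
        have : ¬ (g3 = d) := fun hc => hrole (hc ▸ hg3'.symm).symm
        simp [pvStepB, this]
      rw [hstep, hB, pvStepB_prefix rs [[g0, g1, g2, g3]] [a, b, c, d]]
      obtain ⟨ih1, ih2⟩ := ih (k + 1) [a, b, c, d] [a, b, c, d]
        (fr ++ [pvJoinTab [g0, g1, g2, g3]])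
        (by rw [show k + 1 - 1 = k from by omega]; exact hdrop') (by omega) rfl hrest rfl rfl rfl
      refine ⟨?_, ih2⟩
      rw [ih1]
      simp

-- space-join absorbs a merged first pair.
lemma pv_join_merge (x y : String) (zs : List String) :
    PySem.Str.join " " (x :: y :: zs) = PySem.Str.join " " ((x ++ " " ++ y) :: zs) := by
  cases zs <;>
    simp [PySem.Str.join, PySem.Chars.join, List.intercalate, List.intersperse, String.ofList]

-- the last line of a run is unchanged by merging its first two lines.
lemma pv_last_merge (g l m : List String) (xs : List (List String))
    (h : l[1]?.getD "" = m[1]?.getD "") :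
    ((g :: l :: xs).getLast?.getD [])[1]?.getD "" = ((m :: xs).getLast?.getD [])[1]?.getD "" := by
  cases xs with
  | nil => simpa using h
  | cons x xs' => simp [List.getLast?_cons_cons]

-- bridge: the grouping fold, rendered with pvJoinTab, is exactly B's run-splitting.
lemma pv_bridge :
    ∀ (t : List (List String)) (g : List String), (∀ l ∈ t, l.length = 4) → g.length = 4 →
      (List.foldl pvStepB [g] t).map pvJoinTab = pvFmtGroups (g :: t) := by
  intro t
  induction t with
  | nil =>
    intro g _ hg4
    obtain ⟨g0, g1, g2, g3, rfl⟩ : ∃ x y z w, g = [x, y, z, w] := by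
      match g, hg4 with
      | [x, y, z, w], _ => exact ⟨x, y, z, w, rfl⟩
    rw [pvFmtGroups.eq_2]
    simp [pvFmtGroups.eq_1, pvCountRole, PySem.Str.join, PySem.Chars.join, List.intercalate,
      String.ofList, List.getD]
  | cons l rs ih =>
    intro g hall hg4
    obtain ⟨a, b, c, d, rfl⟩ : ∃ a b c d, l = [a, b, c, d] := by
      have h4 := hall l (by simp)
      match l, h4 with
      | [a, b, c, d], _ => exact ⟨a, b, c, d, rfl⟩
    obtain ⟨g0, g1, g2, g3, rfl⟩ : ∃ x y z w, g = [x, y, z, w] := by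
      match g, hg4 with
      | [x, y, z, w], _ => exact ⟨x, y, z, w, rfl⟩
    have hrest : ∀ l' ∈ rs, l'.length = 4 := fun l' hl' => hall l' (by simp [hl'])
    by_cases hrole : g3 = d
    · have hstep : pvStepB [[g0, g1, g2, g3]] [a, b, c, d] =
          [[g0, b, g2 ++ " " ++ c, g3]] := by simp [pvStepB, hrole]
      rw [List.foldl_cons, hstep, ih [g0, b, g2 ++ " " ++ c, g3] hrest rfl]
      -- unfold both sides of pvFmtGroups once and compare the runs
      rw [pvFmtGroups.eq_2, pvFmtGroups.eq_2]
      simp only [List.getD, List.getElem?_cons_zero, List.getElem?_cons_succ, Option.getD_some]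
      have hc : pvCountRole g3 ([a, b, c, d] :: rs) = 1 + pvCountRole g3 rs := by
        simp [pvCountRole, List.getD, hrole]
      rw [hc]
      have htake : ∀ m : Nat,
          ([g0, g1, g2, g3] :: [a, b, c, d] :: rs).take (1 + (1 + m)) =
            [g0, g1, g2, g3] :: [a, b, c, d] :: rs.take m := by
        intro m
        rw [show 1 + (1 + m) = m + 1 + 1 from by omega]
        simp
      have hdrop : ∀ m : Nat,
          ([g0, g1, g2, g3] :: [a, b, c, d] :: rs).drop (1 + (1 + m)) = rs.drop m := by
        intro m
        rw [show 1 + (1 + m) = m + 1 + 1 from by omega]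
        simp
      rw [htake, hdrop]
      rw [show 1 + pvCountRole g3 rs = pvCountRole g3 rs + 1 from by omega]
      simp only [List.take_succ_cons, List.drop_succ_cons, List.headD_cons, List.map_cons]
      rw [pv_last_merge [g0, g1, g2, g3] [a, b, c, d] [g0, b, g2 ++ " " ++ c, g3]
        (rs.take (pvCountRole g3 rs)) (by simp)]
      simp only [List.getElem?_cons_zero, List.getElem?_cons_succ, Option.getD_some]
      rw [pv_join_merge g2 c]
    · have hstep : pvStepB [[g0, g1, g2, g3]] [a, b, c, d] =
          [[g0, g1, g2, g3]] ++ [[a, b, c, d]] := by simp [pvStepB, hrole]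
      rw [List.foldl_cons, hstep, pvStepB_prefix rs [[g0, g1, g2, g3]] [a, b, c, d]]
      rw [pvFmtGroups.eq_2]
      have hne : d ≠ g3 := fun hh => hrole hh.symm
      have hc : pvCountRole (([g0, g1, g2, g3] : List String).getD 3 "")
          ([a, b, c, d] :: rs) = 0 := by
        simp [pvCountRole, List.getD, hne]
      simp only [List.getD, List.getElem?_cons_zero, List.getElem?_cons_succ,
        Option.getD_some] at hc ⊢
      rw [hc]
      simp only [List.take, List.drop, List.map_cons, List.map_append]
      rw [ih [a, b, c, d] hrest rfl]
      simp [pvJoinTab, PySem.Str.join, PySem.Chars.join, List.intercalate, String.ofList]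

theorem pv_main (vc : List (List String)) (h : Pre_format_voice_content vc) :
    format_voice_content vc = format_voice_content_alt vc := by
  match vc, h with
  | [], _ => rfl
  | [v0], _ =>
    simp [format_voice_content, format_voice_content_alt, pvFmtGroups.eq_1,
      PySem.List.enumerate, pvStepA, filter_result, filter_result_alt]
  | v0 :: v1 :: t2, h =>
    have hpre : ∀ l ∈ (v1 :: t2), l.length = 4 := by
      rcases h with h | h
      · simp at h
      · exact h.2
    obtain ⟨a, b, c, d, rfl⟩ : ∃ a b c d, v1 = [a, b, c, d] := by
      have h4 := hpre v1 (by simp)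
      match v1, h4 with
      | [a, b, c, d], _ => exact ⟨a, b, c, d, rfl⟩
    have hrest : ∀ l ∈ t2, l.length = 4 := fun l hl => hpre l (by simp [hl])
    obtain ⟨h1, h2⟩ := pv_loop (v0 :: [a, b, c, d] :: t2) t2 2 [a, b, c, d] [a, b, c, d]
      [v0.headD ""] rfl (by omega) rfl hrest rfl rfl rfl
    have hA : format_voice_content (v0 :: [a, b, c, d] :: t2) =
        (let st := List.foldl (pvStepA (v0 :: [a, b, c, d] :: t2))
            ([v0.headD ""], [a, b, c, d]) (PySem.List.enumerate t2 ((2 : Nat) : Int));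
          (if st.2.length > 0 then st.1 ++ [pvJoinTab st.2] else st.1,
            filter_result (if st.2.length > 0 then st.1 ++ [pvJoinTab st.2] else st.1))) := by
      simp only [format_voice_content, PySem.List.enumerate_cons, List.foldl_cons]
      norm_num [pvStepA]
    rw [hA]
    simp only [h2, show (4 : Nat) > 0 by omega, if_pos]
    simp only [format_voice_content_alt]
    rw [show filter_result = filter_result_alt from rfl]
    have hfst :
        (List.foldl (pvStepA (v0 :: [a, b, c, d] :: t2)) ([v0.headD ""], [a, b, c, d])
              (PySem.List.enumerate t2 ((2 : Nat) : Int))).1 ++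
            [pvJoinTab
              (List.foldl (pvStepA (v0 :: [a, b, c, d] :: t2)) ([v0.headD ""], [a, b, c, d])
                (PySem.List.enumerate t2 ((2 : Nat) : Int))).2] =
          v0.headD "" :: pvFmtGroups ([a, b, c, d] :: t2) := by
      rw [h1, pv_bridge t2 [a, b, c, d] hrest rfl]
      simp
    rw [hfst]

-- ===== VERDICT (by name: the statement is the Claim_ definition above) =====
theorem format_voice_content_spec : Claim_equal_format_voice_content := by
  intro vc _ hpre
  exact pv_main vc hpre
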